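-- pv_equiv track=rewrite | github.com/qiulinfan/mathnotes-probability | scripts/convert_notes.py | quote_markdown_block
-- ===== SOURCE A (Python) =====
-- def quote_markdown_block(header: str, body: str) -> str:
--     lines = [f"> {header}"]
--     if body:
--         normalized_body_lines = dedent_lines(body.splitlines())
--         for line in normalized_body_lines:
--             stripped_line = line.lstrip()
--             lines.append(">" if not stripped_line else f"> {stripped_line}")
--     return "\n".join(lines)
--
-- def count_indent(line: str) -> int:
--     expanded = line.expandtabs(4)
--     return len(expanded) - len(expanded.lstrip(" "))
--
-- def dedent_lines(lines: list[str]) -> list[str]: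
--     nonblank = [count_indent(line) for line in lines if line.strip()]
--     if not nonblank:
--         return ["" for _ in lines]
--
--     margin = min(nonblank)
--     return [line.expandtabs(4)[margin:] if line.strip() else "" for line in lines]
-- ===== SOURCE B (Python) =====
-- def quote_markdown_block(header: str, body: str) -> str:
--     # One local pass: dedent + lstrip collapses to expandtabs(4).lstrip() per line.
--     quoted = [f"> {header}"]
--     if body:
--         quoted += [f"> {s}" if s else ">"
--                    for s in (line.expandtabs(4).lstrip() for line in body.splitlines())]
--     return "\n".join(quoted)
-- ===== Notes on version B (the rewrite author's own statement) =====
-- stated objective: simpler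
-- what changed: Dropped the two-stage dedent (global min-indent scan then reshape) entirely: since the final lstrip erases any leading spaces the margin slice would have removed, B formats each line independently in one comprehension as expandtabs(4).lstrip().
import Mathlib
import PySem

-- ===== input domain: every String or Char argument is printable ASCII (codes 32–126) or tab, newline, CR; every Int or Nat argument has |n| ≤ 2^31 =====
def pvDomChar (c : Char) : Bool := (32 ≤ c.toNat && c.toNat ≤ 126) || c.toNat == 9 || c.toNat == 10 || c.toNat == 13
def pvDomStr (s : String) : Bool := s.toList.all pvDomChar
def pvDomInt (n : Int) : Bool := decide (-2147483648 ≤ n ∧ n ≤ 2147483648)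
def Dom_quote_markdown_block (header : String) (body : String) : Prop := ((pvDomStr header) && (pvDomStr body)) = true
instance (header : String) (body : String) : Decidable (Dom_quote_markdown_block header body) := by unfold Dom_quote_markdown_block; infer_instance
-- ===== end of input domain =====

-- B drops A's global min-indent dedent pass (made redundant by the final lstrip) and formats
-- each line independently as expandtabs(4).lstrip() — simpler, same results.

-- ===== PORT A =====

-- hand port of str.expandtabs(4) (PySem has no expandtabs): exact — the column advances by 1
-- per character, resets to 0 after '\n'/'\r', and a tab emits spaces up to the next multiple of 4
def pvExpandtabsGo (cs : List Char) (col : Nat) : List Char :=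
  match cs with
  | [] => []
  | c :: rest =>
    if c = '\t' then
      let pad := 4 - col % 4
      List.replicate pad ' ' ++ pvExpandtabsGo rest (col + pad)
    else if c = '\n' ∨ c = '\r' then c :: pvExpandtabsGo rest 0
    else c :: pvExpandtabsGo rest (col + 1)

def pvExpandtabs (cs : List Char) : List Char := pvExpandtabsGo cs 0

-- count_indent: lstrip(" ") hand-ported as dropWhile (· == ' ') (exact: lstrip with an explicit
-- chars argument drops exactly those leading characters)
def pvCountIndent (line : List Char) : Nat :=
  let expanded := pvExpandtabs line
  expanded.length - (expanded.dropWhile (· == ' ')).length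

-- dedent_lines: min(nonblank) is PySem.List.min? (guarded nonempty, so getD never fires);
-- the slice expanded[margin:] with 0 ≤ margin is List.drop margin
def pvDedentLines (lines : List (List Char)) : List (List Char) :=
  let nonblank := (lines.filter (fun l => !(PySem.Chars.strip l).isEmpty)).map pvCountIndent
  if nonblank = [] then lines.map (fun _ => [])
  else
    let margin := (PySem.List.min? nonblank (fun x => x)).getD 0
    lines.map (fun line =>
      if !(PySem.Chars.strip line).isEmpty then (pvExpandtabs line).drop margin else [])

def quote_markdown_block (header : String) (body : String) : String :=
  let lines : List (List Char) := ['>' :: ' ' :: header.toList]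
  let lines :=
    if body.toList ≠ [] then
      (pvDedentLines (PySem.Chars.splitlines body.toList)).foldl
        (fun acc line =>
          let stripped := PySem.Chars.lstrip line
          acc ++ [if stripped.isEmpty then ['>'] else '>' :: ' ' :: stripped]) lines
    else lines
  String.ofList (PySem.Chars.join ['\n'] lines)

-- ===== PORT B =====
def quote_markdown_block_alt (header : String) (body : String) : String :=
  let quoted : List (List Char) := ['>' :: ' ' :: header.toList]
  let quoted :=
    if body.toList ≠ [] then
      quoted ++ (PySem.Chars.splitlines body.toList).map
        (fun line =>
          let s := PySem.Chars.lstrip (pvExpandtabs line)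
          if s.isEmpty then ['>'] else '>' :: ' ' :: s)
    else quoted
  String.ofList (PySem.Chars.join ['\n'] quoted)

-- ===== PRECONDITION & SPEC =====
def Spec_quote_markdown_block (header : String) (body : String) (out : String) : Prop := out = quote_markdown_block_alt header body
instance (header : String) (body : String) (out : String) : Decidable (Spec_quote_markdown_block header body out) := by unfold Spec_quote_markdown_block; infer_instance

-- ===== CLAIM (what is proved, stated in full; the proofs are below) =====
def Claim_equal_quote_markdown_block : Prop := ∀ (header : String) (body : String), Dom_quote_markdown_block header body → Spec_quote_markdown_block header body (quote_markdown_block header body)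

-- ===== LEMMAS AND PROOFS =====

-- every character expandtabs emits is a space or a character of the input
theorem pvExpandtabsGo_mem (cs : List Char) (col : Nat) (c : Char)
    (h : c ∈ pvExpandtabsGo cs col) : c = ' ' ∨ c ∈ cs := by
  induction cs generalizing col with
  | nil => simp [pvExpandtabsGo] at h
  | cons x tl ih =>
    unfold pvExpandtabsGo at h
    split_ifs at h with h1 h2
    · simp only [List.mem_append, List.mem_replicate] at h
      rcases h with h | h
      · exact Or.inl h.2
      · rcases ih _ h with h' | h'
        · exact Or.inl h'
        · exact Or.inr (List.mem_cons_of_mem _ h')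
    all_goals
      rcases List.mem_cons.mp h with h' | h'
      · exact Or.inr (h' ▸ List.mem_cons_self)
      · rcases ih _ h' with h'' | h''
        · exact Or.inl h''
        · exact Or.inr (List.mem_cons_of_mem _ h'')

-- a line whose strip() is empty consists of whitespace only
theorem pv_strip_nil_all_space (l : List Char) (h : PySem.Chars.strip l = [])
    (c : Char) (hc : c ∈ l) : PySem.Chars.isspace c = true := by
  simp only [PySem.Chars.strip, PySem.Chars.rstrip, PySem.Chars.lstrip,
    List.reverse_eq_nil_iff, List.dropWhile_eq_nil_iff, List.mem_reverse] at h
  by_cases hsp : PySem.Chars.isspace c = true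
  · exact hsp
  · -- c survives the lstrip dropWhile, hence is in its result, hence h applies
    have hmem : c ∈ List.dropWhile PySem.Chars.isspace l := by
      have := List.takeWhile_append_dropWhile (p := PySem.Chars.isspace) (l := l)
      rw [← this] at hc
      rcases List.mem_append.mp hc with h' | h'
      · exact absurd (List.mem_takeWhile_imp h') hsp
      · exact h'
    exact h c hmem

-- blank line: its lstrip'd expandtabs is empty
theorem pv_blank_expand (l : List Char) (h : PySem.Chars.strip l = []) :
    PySem.Chars.lstrip (pvExpandtabs l) = [] := by
  simp only [PySem.Chars.lstrip, List.dropWhile_eq_nil_iff]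
  intro c hc
  rcases pvExpandtabsGo_mem l 0 c hc with h' | h'
  · subst h'; decide
  · exact pv_strip_nil_all_space l h c h'

-- dropping at most the leading spaces does not change lstrip
theorem pv_lstrip_drop (cs : List Char) (k : Nat)
    (hk : k ≤ (cs.takeWhile (· == ' ')).length) :
    PySem.Chars.lstrip (cs.drop k) = PySem.Chars.lstrip cs := by
  induction cs generalizing k with
  | nil => simp at hk; simp [hk]
  | cons c tl ih =>
    cases k with
    | zero => rfl
    | succ k' =>
      have hc : (c == ' ') = true := by
        by_contra hne
        simp only [List.takeWhile_cons] at hk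
        rw [Bool.not_eq_true] at hne
        simp [hne] at hk
      have hc' : c = ' ' := by simpa using hc
      subst hc'
      simp only [List.takeWhile_cons] at hk
      rw [List.drop_succ_cons]
      rw [ih k' (by simpa using Nat.le_of_succ_le_succ hk)]
      have hsp : PySem.Chars.isspace ' ' = true := by decide
      simp [PySem.Chars.lstrip, hsp]

-- count_indent is the length of the leading-space run of the expanded line
theorem pvCountIndent_eq (l : List Char) :
    pvCountIndent l = ((pvExpandtabs l).takeWhile (· == ' ')).length := by
  have := List.takeWhile_append_dropWhile (p := (· == ' ')) (l := pvExpandtabs l)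
  have hlen := congrArg List.length this
  simp only [List.length_append] at hlen
  simp only [pvCountIndent]
  omega

-- the heart: A's dedent-then-format pass equals B's per-line format pass
theorem pv_main (L : List (List Char)) :
    (pvDedentLines L).map (fun line =>
        let stripped := PySem.Chars.lstrip line
        if stripped.isEmpty then ['>'] else '>' :: ' ' :: stripped)
      = L.map (fun line =>
        let s := PySem.Chars.lstrip (pvExpandtabs line)
        if s.isEmpty then ['>'] else '>' :: ' ' :: s) := by
  unfold pvDedentLines
  by_cases hnb : ((L.filter (fun l => !(PySem.Chars.strip l).isEmpty)).map pvCountIndent) = []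
  · simp only [hnb, if_true, List.map_map]
    refine List.map_congr_left (fun line hline => ?_)
    have hblank : PySem.Chars.strip line = [] := by
      rcases List.map_eq_nil_iff.mp hnb with hfil
      have := List.filter_eq_nil_iff.mp hfil line hline
      simpa using this
    simp only [Function.comp_apply]
    rw [pv_blank_expand line hblank]
    simp [PySem.Chars.lstrip]
  · simp only [hnb, if_false, List.map_map]
    obtain ⟨m, hm⟩ : ∃ m, PySem.List.min? ((L.filter (fun l => !(PySem.Chars.strip l).isEmpty)).map pvCountIndent) (fun x => x) = some m := by
      cases h : PySem.List.min? ((L.filter (fun l => !(PySem.Chars.strip l).isEmpty)).map pvCountIndent) (fun x => x) with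
      | none => exact absurd ((PySem.List.min?_eq_none_iff _ _).mp h) hnb
      | some m => exact ⟨m, rfl⟩
    refine List.map_congr_left (fun line hline => ?_)
    simp only [Function.comp_apply, hm, Option.getD_some]
    by_cases hbl : (PySem.Chars.strip line).isEmpty
    · have hblank : PySem.Chars.strip line = [] := by simpa using hbl
      have hin : (!(PySem.Chars.strip line).isEmpty) = false := by simp [hblank]
      simp only [hin, Bool.false_eq_true, if_false]
      rw [pv_blank_expand line hblank]
      simp [PySem.Chars.lstrip]
    · have hmemnb : pvCountIndent line ∈ (L.filter (fun l => !(PySem.Chars.strip l).isEmpty)).map pvCountIndent :=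
        List.mem_map_of_mem (List.mem_filter.mpr ⟨hline, by simpa using hbl⟩)
      have hle : m ≤ pvCountIndent line := PySem.List.min?_isMin hm _ hmemnb
      have hdrop := pv_lstrip_drop (pvExpandtabs line) m (by rw [← pvCountIndent_eq]; exact hle)
      have hin : (!(PySem.Chars.strip line).isEmpty) = true := by simpa using hbl
      simp only [hin, if_true]
      rw [hdrop]

theorem quote_markdown_block_spec : Claim_equal_quote_markdown_block := by
  intro header body _
  show quote_markdown_block header body = quote_markdown_block_alt header body
  unfold quote_markdown_block quote_markdown_block_alt
  by_cases hb : body.toList = []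
  · simp [hb]
  · simp only [hb, ne_eq, not_false_iff, if_pos]
    rw [PySem.List.foldl_append_singleton_eq_map, pv_main]
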